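-- pv_equiv track=rewrite | github.com/aimanmaniyar-123/blog_creation_backend | main.py | clean_separator_lines
-- ===== SOURCE A (Python) =====
-- def clean_separator_lines(text: str) -> str:
--     """
--     Remove separator lines like ====, ----, ___, ****, #######.
--     """
--     lines = text.split("\n")
--     cleaned = []
--     for line in lines:
--         stripped = line.strip()
--         if stripped and all(c in "=-_*#" for c in stripped):
--             continue
--         cleaned.append(line)
--     return "\n".join(cleaned)
-- ===== SOURCE B (Python) =====
-- # Single-pass DFA over the characters: no split, no per-line strip/all scan, no join.
-- # States: 0 = leading whitespace, 1 = separator run, 2 = trailing whitespace after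
-- # separators, 3 = ordinary line.  A line is dropped iff its final state is 1 or 2
-- # (i.e. it matches ws* [=-_*#]+ ws*), which is exactly "stripped and all(c in seps)".
-- _SEPS = "=-_*#"
--
--
-- def _step(state: int, ch: str) -> int:
--     if state == 0:
--         return 0 if ch.isspace() else (1 if ch in _SEPS else 3)
--     if state == 1:
--         return 1 if ch in _SEPS else (2 if ch.isspace() else 3)
--     if state == 2:
--         return 2 if ch.isspace() else 3
--     return 3
--
--
-- def clean_separator_lines(text: str) -> str:
--     out = []
--     buf = []
--     state = 0
--     first = True
--     for ch in text:
--         if ch == "\n":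
--             if state != 1 and state != 2:
--                 if first:
--                     first = False
--                 else:
--                     out.append("\n")
--                 out.extend(buf)
--             buf = []
--             state = 0
--         else:
--             buf.append(ch)
--             state = _step(state, ch)
--     if state != 1 and state != 2:
--         if first:
--             first = False
--         else:
--             out.append("\n")
--         out.extend(buf)
--     return "".join(out)
-- ===== Notes on version B (the rewrite author's own statement) =====
-- stated objective: alternative
-- what changed: Replaces A's line-splitting plus per-line strip()/all() scanning plus newline join with a single character-level pass running a 4-state DFA (leading-ws / separator-run / trailing-ws / ordinary) that flushes or drops each line buffer in place.
import Mathlib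
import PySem

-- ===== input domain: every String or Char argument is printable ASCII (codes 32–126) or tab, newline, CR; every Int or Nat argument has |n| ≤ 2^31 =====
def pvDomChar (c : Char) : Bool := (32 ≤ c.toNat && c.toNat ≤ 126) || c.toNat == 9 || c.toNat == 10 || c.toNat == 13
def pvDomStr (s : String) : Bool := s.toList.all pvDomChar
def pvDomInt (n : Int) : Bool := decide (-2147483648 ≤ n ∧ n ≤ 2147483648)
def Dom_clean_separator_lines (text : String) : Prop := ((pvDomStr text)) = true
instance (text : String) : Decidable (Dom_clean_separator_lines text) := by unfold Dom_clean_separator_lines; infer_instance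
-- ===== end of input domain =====

-- B replaces A's split("\n") + per-line strip()/all() scan + "\n".join with one character-level
-- pass of a 4-state DFA that flushes or drops each line buffer in place (same cost, different algorithm).

-- ===== PORT A =====
def clean_separator_lines (text : String) : String :=
  let lines := (PySem.Str.split? text "\n").getD []
  let cleaned := lines.foldl (fun acc line =>
      let stripped := PySem.Str.strip line
      if stripped ≠ "" ∧ stripped.toList.all (fun c => PySem.Str.isIn (String.singleton c) "=-_*#") then
        acc
      else acc ++ [line]) ([] : List String)
  PySem.Str.join "\n" cleaned

-- ===== PORT B =====
-- `ch in _SEPS` of Source B (a 1-char needle, so Python's substring test is membership)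
def cslIsSep (ch : Char) : Bool := PySem.Str.isIn (String.singleton ch) "=-_*#"

-- _step of Source B
def cslStep (state : Nat) (ch : Char) : Nat :=
  if state = 0 then
    if PySem.Chars.isspace ch then 0 else if cslIsSep ch then 1 else 3
  else if state = 1 then
    if cslIsSep ch then 1 else if PySem.Chars.isspace ch then 2 else 3
  else if state = 2 then
    if PySem.Chars.isspace ch then 2 else 3
  else 3

-- the flush step of Source B: emit the buffered line unless the DFA accepted it as a separator line
def cslFlush (out : List Char) (buf : List Char) (state : Nat) (first : Bool) : List Char × Bool :=
  if state ≠ 1 ∧ state ≠ 2 then ((if first then out else out ++ ['\n']) ++ buf, false)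
  else (out, first)

def clean_separator_lines_alt (text : String) : String :=
  let fin := text.toList.foldl
    (fun (s : List Char × List Char × Nat × Bool) ch =>
      let (out, buf, state, first) := s
      if ch = '\n' then
        let (out', first') := cslFlush out buf state first
        (out', [], 0, first')
      else (out, buf ++ [ch], cslStep state ch, first))
    ([], [], 0, true)
  String.ofList (cslFlush fin.1 fin.2.1 fin.2.2.1 fin.2.2.2).1

-- ===== PRECONDITION & SPEC =====
def Spec_clean_separator_lines (text : String) (out : String) : Prop := out = clean_separator_lines_alt text
instance (text : String) (out : String) : Decidable (Spec_clean_separator_lines text out) := by unfold Spec_clean_separator_lines; infer_instance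

-- ===== CLAIM (what is proved, stated in full; the proofs are below) =====
def Claim_equal_clean_separator_lines : Prop := ∀ (text : String), Dom_clean_separator_lines text → Spec_clean_separator_lines text (clean_separator_lines text)

-- ===== LEMMAS AND PROOFS =====

-- run of Source B's DFA over a whole line
def dfaRun (st : Nat) (cs : List Char) : Nat := cs.foldl cslStep st

-- A's per-line keep decision, on char lists
def keepLine (cs : List Char) : Bool :=
  !(decide (PySem.Chars.strip cs ≠ []) && (PySem.Chars.strip cs).all cslIsSep)

-- what B's interleaved flushes emit for a list of kept lines ('\n' before each except the overall first)
def cslEmitL : Bool → List (List Char) → List Char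
  | _, [] => []
  | true, l :: ls => l ++ cslEmitL false ls
  | false, l :: ls => '\n' :: (l ++ cslEmitL false ls)

theorem isIn_singleton (c : Char) (l : List Char) : PySem.Chars.isIn [c] l = l.contains c := by
  rw [Bool.eq_iff_iff, PySem.Chars.isIn_iff_infix, List.singleton_infix_iff, List.contains_iff_mem]

theorem cslIsSep_eq (c : Char) : cslIsSep c = ['=', '-', '_', '*', '#'].contains c := by
  have h : (String.singleton c).toList = [c] := by simp
  rw [cslIsSep, PySem.Str.isIn, h, isIn_singleton]
  rfl

theorem sep_not_space {c : Char} (h : cslIsSep c = true) : PySem.Chars.isspace c = false := by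
  rw [cslIsSep_eq] at h
  simp at h
  rcases h with h|h|h|h|h <;> subst h <;> decide

theorem rstrip_cons (c : Char) (u : List Char) :
    PySem.Chars.rstrip (c :: u) =
      if PySem.Chars.isspace c && u.all PySem.Chars.isspace then [] else c :: PySem.Chars.rstrip u := by
  simp only [PySem.Chars.rstrip, List.reverse_cons, List.dropWhile_append]
  by_cases h : u.all PySem.Chars.isspace
  · have hd : u.reverse.dropWhile PySem.Chars.isspace = [] := by
      rw [List.dropWhile_eq_nil_iff]
      intro x hx; exact (List.all_eq_true.mp h) x (List.mem_reverse.mp hx)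
    by_cases hc : PySem.Chars.isspace c <;> simp [hd, hc, h, List.dropWhile]
  · have hd : u.reverse.dropWhile PySem.Chars.isspace ≠ [] := by
      rw [Ne, List.dropWhile_eq_nil_iff]
      intro hall
      exact h (List.all_eq_true.mpr fun x hx => hall x (List.mem_reverse.mpr hx))
    simp [List.isEmpty_iff, hd, h]

theorem rstrip_all_sep (u : List Char) :
    (PySem.Chars.rstrip u).all cslIsSep = (u.dropWhile cslIsSep).all PySem.Chars.isspace := by
  induction u with
  | nil => simp [PySem.Chars.rstrip]
  | cons c u ih =>
    rw [rstrip_cons, List.dropWhile]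
    by_cases hs : cslIsSep c
    · have hns : PySem.Chars.isspace c = false := sep_not_space hs
      simp [hs, hns, ih]
    · by_cases hw : PySem.Chars.isspace c
      · by_cases hall : u.all PySem.Chars.isspace
        · simp [hw, hall, hs]
        · rw [if_neg (by simp [hw, hall])]
          simp [hs, hw, hall]
      · simp [hs, hw]

theorem run3 (cs : List Char) : dfaRun 3 cs = 3 := by
  induction cs with
  | nil => rfl
  | cons c cs ih => simpa [dfaRun, cslStep] using ih

theorem run2 (cs : List Char) :
    dfaRun 2 cs = if cs.all PySem.Chars.isspace then 2 else 3 := by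
  induction cs with
  | nil => rfl
  | cons c cs ih =>
    by_cases hw : PySem.Chars.isspace c
    · simpa [dfaRun, cslStep, hw] using ih
    · simp [dfaRun, cslStep, hw]
      simpa [dfaRun] using run3 cs

theorem run1 (cs : List Char) :
    dfaRun 1 cs = if cs.all cslIsSep then 1
      else if (cs.dropWhile cslIsSep).all PySem.Chars.isspace then 2 else 3 := by
  induction cs with
  | nil => rfl
  | cons c cs ih =>
    by_cases hs : cslIsSep c
    · have hsc : cslStep 1 c = 1 := by simp [cslStep, hs]
      rw [show dfaRun 1 (c :: cs) = dfaRun (cslStep 1 c) cs from rfl, hsc, ih]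
      simp [hs]
    · by_cases hw : PySem.Chars.isspace c
      · have hsc : cslStep 1 c = 2 := by simp [cslStep, hs, hw]
        rw [show dfaRun 1 (c :: cs) = dfaRun (cslStep 1 c) cs from rfl, hsc, run2 cs]
        simp [hs, hw, List.dropWhile]
      · have hsc : cslStep 1 c = 3 := by simp [cslStep, hs, hw]
        rw [show dfaRun 1 (c :: cs) = dfaRun (cslStep 1 c) cs from rfl, hsc, run3 cs]
        simp [hs, hw, List.dropWhile]

theorem acc0 (cs : List Char) :
    (dfaRun 0 cs = 1 ∨ dfaRun 0 cs = 2) ↔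
      (PySem.Chars.strip cs ≠ [] ∧ (PySem.Chars.strip cs).all cslIsSep = true) := by
  induction cs with
  | nil => simp [dfaRun, PySem.Chars.strip, PySem.Chars.lstrip, PySem.Chars.rstrip]
  | cons c cs ih =>
    by_cases hw : PySem.Chars.isspace c
    · have h1 : dfaRun 0 (c :: cs) = dfaRun 0 cs := by simp [dfaRun, cslStep, hw]
      have h2 : PySem.Chars.strip (c :: cs) = PySem.Chars.strip cs := by
        simp [PySem.Chars.strip, PySem.Chars.lstrip, List.dropWhile, hw]
      rw [h1, h2]; exact ih
    · have hl : PySem.Chars.strip (c :: cs) = PySem.Chars.rstrip (c :: cs) := by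
        simp [PySem.Chars.strip, PySem.Chars.lstrip, List.dropWhile, hw]
      have hrc : PySem.Chars.rstrip (c :: cs) = c :: PySem.Chars.rstrip cs := by
        rw [rstrip_cons]; simp [hw]
      by_cases hs : cslIsSep c
      · have h1 : dfaRun 0 (c :: cs) = dfaRun 1 cs := by simp [dfaRun, cslStep, hw, hs]
        rw [h1, run1, hl, hrc]
        constructor
        · intro h
          refine ⟨by simp, ?_⟩
          simp only [List.all_cons, hs, Bool.true_and, rstrip_all_sep]
          split_ifs at h with h1 h2
          · have : List.dropWhile cslIsSep cs = [] :=
              List.dropWhile_eq_nil_iff.mpr fun x hx => List.all_eq_true.mp h1 x hx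
            simp [this]
          · exact h2
          · rcases h with h | h <;> norm_num at h
        · rintro ⟨-, hall⟩
          simp only [List.all_cons, hs, Bool.true_and, rstrip_all_sep] at hall
          split_ifs with h1
          · exact Or.inl rfl
          · exact Or.inr rfl
      · have h1 : dfaRun 0 (c :: cs) = dfaRun 3 cs := by simp [dfaRun, cslStep, hw, hs]
        rw [h1, run3, hl, hrc]
        simp [hs]

theorem keep_iff (cs : List Char) :
    (dfaRun 0 cs ≠ 1 ∧ dfaRun 0 cs ≠ 2) ↔ keepLine cs = true := by
  rw [← not_or, acc0]
  simp [keepLine]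
  tauto

theorem go_zero (sep l cur acc) : PySem.Chars.splitOn.go sep 0 l cur acc = ((cur.reverse ++ l) :: acc).reverse := by
  rw [PySem.Chars.splitOn.go]

theorem go_succ_nil (sep f cur acc) : PySem.Chars.splitOn.go sep (f+1) [] cur acc = (cur.reverse :: acc).reverse := by
  rw [PySem.Chars.splitOn.go]; simp

theorem go_succ_cons (sep f c rest cur acc) : PySem.Chars.splitOn.go sep (f+1) (c :: rest) cur acc =
    if sep.isPrefixOf (c :: rest) then PySem.Chars.splitOn.go sep f (List.drop sep.length (c :: rest)) [] (cur.reverse :: acc)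
    else PySem.Chars.splitOn.go sep f rest (c :: cur) acc := by
  rw [PySem.Chars.splitOn.go]

theorem nl_prefix (c : Char) (rest : List Char) :
    (['\n'].isPrefixOf (c :: rest)) = ('\n' == c) := by
  simp [List.isPrefixOf]

theorem splitOn_go_no_nl (fuel : Nat) (l cur : List Char) (acc : List (List Char))
    (h : '\n' ∉ l) :
    PySem.Chars.splitOn.go ['\n'] fuel l cur acc = ((cur.reverse ++ l) :: acc).reverse := by
  induction fuel generalizing l cur with
  | zero => exact go_zero _ _ _ _
  | succ f ih =>
    cases l with
    | nil => simp [go_succ_nil]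
    | cons c rest =>
      have hc : ('\n' == c) = false := by
        simp only [List.mem_cons, not_or] at h
        simpa using h.1
      rw [go_succ_cons, nl_prefix, hc, if_neg (by simp)]
      rw [ih rest (c :: cur) (by simp_all [List.mem_cons])]
      simp

theorem splitOn_go_acc (fuel : Nat) (l cur : List Char) (acc : List (List Char)) :
    PySem.Chars.splitOn.go ['\n'] fuel l cur acc = acc.reverse ++ PySem.Chars.splitOn.go ['\n'] fuel l cur [] := by
  induction fuel generalizing l cur acc with
  | zero => simp [go_zero]
  | succ f ih =>
    cases l with
    | nil => simp [go_succ_nil]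
    | cons c rest =>
      rw [go_succ_cons, go_succ_cons]
      split_ifs with hp
      · rw [ih _ _ (cur.reverse :: acc), ih _ _ [cur.reverse]]
        simp
      · rw [ih rest (c :: cur) acc]

theorem splitOn_go_split (l : List Char) : ∀ (r cur : List Char) (f : Nat) (acc : List (List Char)), '\n' ∉ l →
    PySem.Chars.splitOn.go ['\n'] (l.length + 1 + f) (l ++ '\n' :: r) cur acc =
      PySem.Chars.splitOn.go ['\n'] f r [] ((cur.reverse ++ l) :: acc) := by
  induction l with
  | nil =>
    intro r cur f acc _
    rw [show List.length ([] : List Char) + 1 + f = f + 1 by simp; omega,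
        show ([] : List Char) ++ '\n' :: r = '\n' :: r from rfl]
    rw [go_succ_cons]
    simp [List.isPrefixOf]
  | cons c l ih =>
    intro r cur f acc h
    have hc : ('\n' == c) = false := by
      simp only [List.mem_cons, not_or] at h
      simpa using h.1
    rw [show (c :: l).length + 1 + f = (l.length + 1 + f) + 1 by simp; omega]
    rw [show (c :: l) ++ '\n' :: r = c :: (l ++ '\n' :: r) from rfl]
    rw [go_succ_cons, nl_prefix, hc, if_neg (by simp)]
    rw [ih r (c :: cur) f acc (by simp_all [List.mem_cons])]
    simp

theorem splitOn_no_nl (l : List Char) (h : '\n' ∉ l) :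
    PySem.Chars.splitOn l ['\n'] = [l] := by
  rw [PySem.Chars.splitOn, splitOn_go_no_nl _ _ _ _ h]
  simp

theorem splitOn_cons (l r : List Char) (h : '\n' ∉ l) :
    PySem.Chars.splitOn (l ++ '\n' :: r) ['\n'] = l :: PySem.Chars.splitOn r ['\n'] := by
  rw [PySem.Chars.splitOn]
  have hlen : (l ++ '\n' :: r).length + 1 = l.length + 1 + (r.length + 1) := by simp; omega
  rw [hlen, splitOn_go_split l r [] (r.length + 1) [] h, splitOn_go_acc]
  simp [PySem.Chars.splitOn]

theorem join_emit (ls : List (List Char)) :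
    PySem.Chars.join ['\n'] ls = cslEmitL true ls := by
  have aux : ∀ (l : List Char) (ls : List (List Char)),
      PySem.Chars.join ['\n'] (l :: ls) = l ++ cslEmitL false ls := by
    intro l ls
    induction ls generalizing l with
    | nil => simp [PySem.Chars.join, cslEmitL, List.intercalate]
    | cons m ms ih =>
      have step : List.intercalate ['\n'] (l :: m :: ms) = l ++ ['\n'] ++ List.intercalate ['\n'] (m :: ms) := by
        simp [List.intercalate, List.intersperse]
      rw [PySem.Chars.join, step, show List.intercalate ['\n'] (m :: ms) = PySem.Chars.join ['\n'] (m :: ms) from rfl, ih m]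
      simp [cslEmitL]
  cases ls with
  | nil => simp [PySem.Chars.join, cslEmitL, List.intercalate]
  | cons l ls => rw [aux l ls]; rfl

-- the main loop invariant for B's single pass
theorem main_inv (L : List Char) : ∀ (buf out : List Char) (first : Bool), '\n' ∉ buf →
    (let fin := L.foldl
        (fun (s : List Char × List Char × Nat × Bool) ch =>
          let (out, buf, state, first) := s
          if ch = '\n' then
            let (out', first') := cslFlush out buf state first
            (out', [], 0, first')
          else (out, buf ++ [ch], cslStep state ch, first))
        (out, buf, dfaRun 0 buf, first);
      (cslFlush fin.1 fin.2.1 fin.2.2.1 fin.2.2.2).1) =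
      out ++ cslEmitL first ((PySem.Chars.splitOn (buf ++ L) ['\n']).filter keepLine) := by
  induction L with
  | nil =>
    intro buf out first hb
    simp only [List.foldl_nil, List.append_nil, splitOn_no_nl buf hb]
    by_cases hk : keepLine buf = true
    · have hcond := (keep_iff buf).mpr hk
      simp only [cslFlush, if_pos hcond, List.filter]
      cases first <;> simp [hk, cslEmitL]
    · have hcond : ¬ (dfaRun 0 buf ≠ 1 ∧ dfaRun 0 buf ≠ 2) := fun h => hk ((keep_iff buf).mp h)
      simp only [cslFlush, if_neg hcond, List.filter]
      simp [Bool.eq_false_iff.mpr hk, cslEmitL]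
  | cons c L ih =>
    intro buf out first hb
    by_cases hc : c = '\n'
    · subst hc
      simp only [List.foldl_cons, if_true]
      by_cases hk : keepLine buf = true
      · have hcond := (keep_iff buf).mpr hk
        have hfl : cslFlush out buf (dfaRun 0 buf) first =
            ((if first then out else out ++ ['\n']) ++ buf, false) := by
          simp [cslFlush, hcond]
        have := ih [] ((if first then out else out ++ ['\n']) ++ buf) false (by simp)
        simp only [List.nil_append] at this
        rw [show dfaRun 0 [] = 0 from rfl] at this
        rw [splitOn_cons buf L hb]
        simp only [List.filter, hk]
        have h2 : (if first then out else out ++ ['\n']) ++ buf ++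
            cslEmitL false ((PySem.Chars.splitOn L ['\n']).filter keepLine) =
            out ++ cslEmitL first (buf :: (PySem.Chars.splitOn L ['\n']).filter keepLine) := by
          cases first <;> simp [cslEmitL]
        rw [hfl]
        exact this.trans h2
      · have hcond : ¬ (dfaRun 0 buf ≠ 1 ∧ dfaRun 0 buf ≠ 2) := fun h => hk ((keep_iff buf).mp h)
        have hfl : cslFlush out buf (dfaRun 0 buf) first = (out, first) := by
          simp [cslFlush, hcond]
        have := ih [] out first (by simp)
        simp only [List.nil_append] at this
        rw [show dfaRun 0 [] = 0 from rfl] at this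
        rw [splitOn_cons buf L hb]
        simp only [List.filter, Bool.eq_false_iff.mpr hk]
        rw [hfl]
        exact this
    · simp only [List.foldl_cons, if_neg hc]
      have hrun : cslStep (dfaRun 0 buf) c = dfaRun 0 (buf ++ [c]) := by
        simp [dfaRun]
      rw [hrun]
      have := ih (buf ++ [c]) out first (by simp [hb, Ne.symm hc])
      rw [List.append_assoc, List.singleton_append] at this
      exact this

theorem toList_eq_nil_iff (s : String) : s.toList = [] ↔ s = "" := by
  constructor
  · intro h
    have := congrArg String.ofList h
    simpa [String.ofList_toList] using this
  · intro h; simp [h]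

-- A's loop is a filter by keepLine
theorem foldA (ls : List String) : ∀ (acc : List String),
    ls.foldl (fun acc line =>
      let stripped := PySem.Str.strip line
      if stripped ≠ "" ∧ stripped.toList.all (fun c => PySem.Str.isIn (String.singleton c) "=-_*#") then
        acc
      else acc ++ [line]) acc = acc ++ ls.filter (fun line => keepLine line.toList) := by
  induction ls with
  | nil => intro acc; simp
  | cons l ls ih =>
    intro acc
    have hbridge : (PySem.Str.strip l ≠ "" ∧
        (PySem.Str.strip l).toList.all (fun c => PySem.Str.isIn (String.singleton c) "=-_*#")) ↔
        keepLine l.toList = false := by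
      rw [keepLine]
      constructor
      · rintro ⟨h1, h2⟩
        have h1' : PySem.Chars.strip l.toList ≠ [] := by
          rw [← PySem.Str.toList_strip]
          intro h; exact h1 ((toList_eq_nil_iff _).mp h)
        have h2' : (PySem.Chars.strip l.toList).all cslIsSep = true := by
          rw [← PySem.Str.toList_strip]
          exact h2
        simp [h1', h2']
      · intro h
        simp only [Bool.not_eq_false', Bool.and_eq_true, decide_eq_true_eq] at h
        refine ⟨?_, ?_⟩
        · intro he
          exact h.1 (by rw [← PySem.Str.toList_strip, he]; simp)
        · show (PySem.Str.strip l).toList.all cslIsSep = true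
          rw [PySem.Str.toList_strip]
          exact h.2
    simp only [List.foldl_cons, List.filter]
    by_cases hcond : (PySem.Str.strip l ≠ "" ∧
        (PySem.Str.strip l).toList.all (fun c => PySem.Str.isIn (String.singleton c) "=-_*#"))
    · rw [if_pos hcond, ih acc, hbridge.mp hcond]
    · rw [if_neg hcond]
      have hk : keepLine l.toList = true := by
        rcases Bool.eq_false_or_eq_true (keepLine l.toList) with h | h
        · exact h
        · exact absurd (hbridge.mpr h) hcond
      rw [ih (acc ++ [l]), hk]
      simp

-- ===== VERDICT (by name: the statement is the Claim_ definition above) =====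
theorem clean_separator_lines_spec : Claim_equal_clean_separator_lines := by
  intro text _
  show clean_separator_lines text = clean_separator_lines_alt text
  have hlines : (PySem.Str.split? text "\n").getD [] =
      (PySem.Chars.splitOn text.toList ['\n']).map String.ofList := by
    simp [PySem.Str.split?, PySem.Chars.split?]
  have hB := main_inv text.toList [] [] true (by simp)
  simp only [List.nil_append] at hB
  have hBB : clean_separator_lines_alt text =
      String.ofList (cslEmitL true ((PySem.Chars.splitOn text.toList ['\n']).filter keepLine)) :=
    congrArg String.ofList hB
  rw [hBB, clean_separator_lines]
  simp only [hlines, foldA, List.nil_append]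
  have hfilter : ((PySem.Chars.splitOn text.toList ['\n']).map String.ofList).filter
      (fun line => keepLine line.toList) =
      ((PySem.Chars.splitOn text.toList ['\n']).filter keepLine).map String.ofList := by
    rw [List.filter_map]
    congr 1
    apply List.filter_congr
    intro p _
    simp [String.toList_ofList]
  rw [hfilter]
  simp only [PySem.Str.join, List.map_map]
  rw [show ("\n" : String).toList = ['\n'] from rfl]
  rw [show (List.map (String.toList ∘ String.ofList) ((PySem.Chars.splitOn text.toList ['\n']).filter keepLine)) = (PySem.Chars.splitOn text.toList ['\n']).filter keepLine from by simp [Function.comp_def, String.toList_ofList]]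
  rw [join_emit]
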